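-- pv_equiv track=rewrite | github.com/RachelPun/AoC2015 | Day 3/main.py | get_visited_dict_with_robot
-- ===== SOURCE A (Python) =====
-- def get_visited_dict_with_robot(instructions: str) -> dict:
--     """Return a dictionary of location:visit_count."""
--
--     visited = {(0, 0): 2}
--     santa_x, santa_y = 0, 0
--     robot_x, robot_y = 0, 0
--
--     for i, instruction in enumerate(instructions):
--
--         if i % 2 == 1:
--             if instruction == "^":
--                 santa_y += 1
--             if instruction == "v":
--                 santa_y -= 1
--             if instruction == "<":
--                 santa_x -= 1
--             if instruction == ">":
--                 santa_x += 1
--             if (santa_x, santa_y) in visited.keys():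
--                 visited[(santa_x, santa_y)] += 1
--             else:
--                 visited[(santa_x, santa_y)] = 1
--         else:
--             if instruction == "^":
--                 robot_y += 1
--             if instruction == "v":
--                 robot_y -= 1
--             if instruction == "<":
--                 robot_x -= 1
--             if instruction == ">":
--                 robot_x += 1
--             if (robot_x, robot_y) in visited.keys():
--                 visited[(robot_x, robot_y)] += 1
--             else:
--                 visited[(robot_x, robot_y)] = 1
--
--     return visited
-- ===== SOURCE B (Python) =====
-- # B: two-pass decomposition — split instructions into robot (even indices) and
-- # santa (odd indices) streams, walk each from the origin producing its path,
-- # interleave the paths back in visit order, then count occurrences in one pass.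
-- _MOVES = {"^": (0, 1), "v": (0, -1), "<": (-1, 0), ">": (1, 0)}
--
--
-- def _walk(steps):
--     x, y = 0, 0
--     path = []
--     for c in steps:
--         dx, dy = _MOVES.get(c, (0, 0))
--         x, y = x + dx, y + dy
--         path.append((x, y))
--     return path
--
--
-- def _interleave(xs, ys):
--     out = []
--     for a, b in zip(xs, ys):
--         out.append(a)
--         out.append(b)
--     return out + (xs[len(ys):] if len(xs) > len(ys) else ys[len(xs):])
--
--
-- def get_visited_dict_with_robot(instructions: str) -> dict:
--     robot_path = _walk(instructions[0::2])
--     santa_path = _walk(instructions[1::2])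
--     counts = {}
--     for p in [(0, 0), (0, 0)] + _interleave(robot_path, santa_path):
--         counts[p] = counts.get(p, 0) + 1
--     return counts
-- ===== Notes on version B (the rewrite author's own statement) =====
-- stated objective: alternative
-- what changed: A walks both movers in one interleaved loop updating a visit dict per step; B splits the instruction string into the robot stream (even indices) and the santa stream (odd indices), walks each stream separately collecting its path, re-interleaves the two paths into visit order, and counts all positions (plus the doubly-seeded origin) in a single counting pass.
import Mathlib
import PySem

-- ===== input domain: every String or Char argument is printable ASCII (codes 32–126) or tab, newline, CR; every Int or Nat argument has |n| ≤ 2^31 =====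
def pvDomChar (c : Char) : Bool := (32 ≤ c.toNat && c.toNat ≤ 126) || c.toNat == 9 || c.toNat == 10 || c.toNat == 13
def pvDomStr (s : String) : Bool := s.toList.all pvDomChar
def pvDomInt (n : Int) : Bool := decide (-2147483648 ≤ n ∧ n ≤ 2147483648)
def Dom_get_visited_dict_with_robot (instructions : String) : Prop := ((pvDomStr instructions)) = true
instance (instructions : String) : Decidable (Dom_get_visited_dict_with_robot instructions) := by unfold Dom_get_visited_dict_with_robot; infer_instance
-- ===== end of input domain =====

-- B replaces A's single interleaved loop by a two-pass decomposition (split the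
-- instruction string into the robot and santa streams, walk each separately,
-- re-interleave the paths and count in one pass); objective: alternative.


-- ===== PORT A =====
-- the body of A's for-loop, on state (visited, santa_x, santa_y, robot_x, robot_y)
def pvAStep (st : PySem.Dict (Int × Int) Int × Int × Int × Int × Int) (ic : Int × Char) :
    PySem.Dict (Int × Int) Int × Int × Int × Int × Int :=
  match st, ic with
  | (visited, santa_x, santa_y, robot_x, robot_y), (i, instruction) =>
    if PySem.Int.mod i 2 = 1 then
      let santa_y := if instruction = '^' then santa_y + 1 else santa_y
      let santa_y := if instruction = 'v' then santa_y - 1 else santa_y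
      let santa_x := if instruction = '<' then santa_x - 1 else santa_x
      let santa_x := if instruction = '>' then santa_x + 1 else santa_x
      let visited := if (santa_x, santa_y) ∈ visited.keys then
          visited.insert (santa_x, santa_y) (visited.getD (santa_x, santa_y) 0 + 1)
        else visited.insert (santa_x, santa_y) 1
      (visited, santa_x, santa_y, robot_x, robot_y)
    else
      let robot_y := if instruction = '^' then robot_y + 1 else robot_y
      let robot_y := if instruction = 'v' then robot_y - 1 else robot_y
      let robot_x := if instruction = '<' then robot_x - 1 else robot_x
      let robot_x := if instruction = '>' then robot_x + 1 else robot_x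
      let visited := if (robot_x, robot_y) ∈ visited.keys then
          visited.insert (robot_x, robot_y) (visited.getD (robot_x, robot_y) 0 + 1)
        else visited.insert (robot_x, robot_y) 1
      (visited, santa_x, santa_y, robot_x, robot_y)

def get_visited_dict_with_robot (instructions : String) : List (Int × Int × Int) :=
  let visited : PySem.Dict (Int × Int) Int := PySem.Dict.ofList [((0, 0), 2)]
  let st := (PySem.List.enumerate instructions.toList 0).foldl pvAStep (visited, 0, 0, 0, 0)
  -- the returned dict, flattened to (x, y, count) triples per the type convention
  st.1.items.map (fun p => (p.1.1, p.1.2, p.2))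

-- ===== PORT B =====
def pvMoves : PySem.Dict Char (Int × Int) :=
  PySem.Dict.ofList [('^', (0, 1)), ('v', (0, -1)), ('<', (-1, 0)), ('>', (1, 0))]

-- body of _walk's for-loop, on state (x, y, path)
def pvWalkStep (st : Int × Int × List (Int × Int)) (c : Char) : Int × Int × List (Int × Int) :=
  let d := pvMoves.getD c (0, 0)
  (st.1 + d.1, st.2.1 + d.2, st.2.2 ++ [(st.1 + d.1, st.2.1 + d.2)])

def pvWalk (steps : List Char) : List (Int × Int) :=
  (steps.foldl pvWalkStep ((0 : Int), (0 : Int), ([] : List (Int × Int)))).2.2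

def pvInterleave (xs ys : List (Int × Int)) : List (Int × Int) :=
  let out := (xs.zip ys).foldl (fun out p => out ++ [p.1, p.2]) []
  out ++ (if ys.length < xs.length then PySem.List.slice xs (some (PySem.List.len ys)) none
          else PySem.List.slice ys (some (PySem.List.len xs)) none)

def get_visited_dict_with_robot_alt (instructions : String) : List (Int × Int × Int) :=
  let robot_path := pvWalk ((PySem.Str.slice? instructions (some 0) none 2).getD "").toList
  let santa_path := pvWalk ((PySem.Str.slice? instructions (some 1) none 2).getD "").toList
  let counts := ([((0 : Int), (0 : Int)), (0, 0)] ++ pvInterleave robot_path santa_path).foldl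
      (fun d p => d.insert p (d.getD p 0 + 1)) PySem.Dict.empty
  counts.items.map (fun p => (p.1.1, p.1.2, p.2))

-- ===== PRECONDITION & SPEC =====
def Spec_get_visited_dict_with_robot (instructions : String) (out : List (Int × Int × Int)) : Prop := out = get_visited_dict_with_robot_alt instructions
instance (instructions : String) (out : List (Int × Int × Int)) : Decidable (Spec_get_visited_dict_with_robot instructions out) := by unfold Spec_get_visited_dict_with_robot; infer_instance

-- ===== CLAIM (what is proved, stated in full; the proofs are below) =====
def Claim_equal_get_visited_dict_with_robot : Prop := ∀ (instructions : String), Dom_get_visited_dict_with_robot instructions → Spec_get_visited_dict_with_robot instructions (get_visited_dict_with_robot instructions)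

-- ===== LEMMAS AND PROOFS =====

-- one position moved by one instruction character
def pvMove (p : Int × Int) (c : Char) : Int × Int :=
  (p.1 + (pvMoves.getD c (0, 0)).1, p.2 + (pvMoves.getD c (0, 0)).2)

-- the sequence of positions A touches: the mover alternates, so roles swap each step
def pvAPos : List Char → (Int × Int) → (Int × Int) → List (Int × Int)
  | [], _, _ => []
  | c :: cs, a, o => pvMove a c :: pvAPos cs o (pvMove a c)

-- recursive characterisation of pvWalk
def pvWRec : List Char → (Int × Int) → List (Int × Int)
  | [], _ => []
  | c :: cs, p => pvMove p c :: pvWRec cs (pvMove p c)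

-- recursive characterisation of pvInterleave
def pvIRec : List (Int × Int) → List (Int × Int) → List (Int × Int)
  | [], ys => ys
  | x :: xs, ys => x :: pvIRec ys xs
termination_by xs ys => xs.length + ys.length

-- elements at even indices
def pvEvens : List Char → List Char
  | [] => []
  | [x] => [x]
  | x :: _ :: xs => x :: pvEvens xs

def pvCount (d : PySem.Dict (Int × Int) Int) (p : Int × Int) : PySem.Dict (Int × Int) Int :=
  d.insert p (d.getD p 0 + 1)


lemma pvMove_up : pvMoves.getD '^' (0,0) = (0, 1) := by decide
lemma pvMove_dn : pvMoves.getD 'v' (0,0) = (0, -1) := by decide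
lemma pvMove_lt : pvMoves.getD '<' (0,0) = (-1, 0) := by decide
lemma pvMove_gt : pvMoves.getD '>' (0,0) = (1, 0) := by decide
lemma pvMoves_items : pvMoves.items = [('^', (0, 1)), ('v', (0, -1)), ('<', (-1, 0)), ('>', (1, 0))] := by decide
lemma pvMove_other (c : Char) (h1 : c ≠ '^') (h2 : c ≠ 'v') (h3 : c ≠ '<') (h4 : c ≠ '>') :
    pvMoves.getD c (0,0) = (0, 0) := by
  simp [PySem.Dict.getD_eq_get?_getD, PySem.Dict.get?, pvMoves_items, List.find?,
    beq_eq_false_iff_ne.mpr (Ne.symm h1), beq_eq_false_iff_ne.mpr (Ne.symm h2),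
    beq_eq_false_iff_ne.mpr (Ne.symm h3), beq_eq_false_iff_ne.mpr (Ne.symm h4)]

lemma pvMove_cascade (x y : Int) (c : Char) :
    ((if c = '>' then (if c = '<' then x - 1 else x) + 1 else (if c = '<' then x - 1 else x)),
     (if c = 'v' then (if c = '^' then y + 1 else y) - 1 else (if c = '^' then y + 1 else y)))
      = pvMove (x, y) c := by
  by_cases h1 : c = '^'
  · subst h1; simp [pvMove, pvMove_up]
  by_cases h2 : c = 'v'
  · subst h2; simp [pvMove, pvMove_dn]; omega
  by_cases h3 : c = '<'
  · subst h3; simp [pvMove, pvMove_lt]; omega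
  by_cases h4 : c = '>'
  · subst h4; simp [pvMove, pvMove_gt, h3]
  · simp [pvMove, pvMove_other c h1 h2 h3 h4, h1, h2, h3, h4]

lemma pvCount_eq (d : PySem.Dict (Int × Int) Int) (p : Int × Int) :
    (if p ∈ d.keys then d.insert p (d.getD p 0 + 1) else d.insert p 1) = pvCount d p := by
  by_cases h : p ∈ d.keys
  · simp [h, pvCount]
  · have hc : d.contains p = false := by
      rw [← Bool.not_eq_true, PySem.Dict.contains_iff_mem_keys]; exact h
    simp [h, pvCount, PySem.Dict.getD_of_not_contains d 0 hc]

lemma foldA (cs : List Char) : ∀ (k : Nat) (d : PySem.Dict (Int × Int) Int) (sx sy rx ry : Int),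
    ((PySem.List.enumerate cs (k : Int)).foldl pvAStep (d, sx, sy, rx, ry)).1
      = List.foldl pvCount d
          (if k % 2 = 0 then pvAPos cs (rx, ry) (sx, sy) else pvAPos cs (sx, sy) (rx, ry)) := by
  induction cs with
  | nil => intro k d sx sy rx ry; simp [PySem.List.enumerate_nil, pvAPos]
  | cons c cs ih =>
    intro k d sx sy rx ry
    rw [PySem.List.enumerate_cons]
    have hmod : PySem.Int.mod (k : Int) 2 = ((k % 2 : Nat) : Int) := by
      exact_mod_cast PySem.Int.mod_natCast k 2
    have hk1 : ((k : Int) + 1) = ((k + 1 : Nat) : Int) := by push_cast; ring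
    simp only [List.foldl_cons, pvAStep, hmod]
    have hxS := congrArg Prod.fst (pvMove_cascade sx sy c)
    have hyS := congrArg Prod.snd (pvMove_cascade sx sy c)
    have hxR := congrArg Prod.fst (pvMove_cascade rx ry c)
    have hyR := congrArg Prod.snd (pvMove_cascade rx ry c)
    simp only at hxS hyS hxR hyR
    rcases Nat.even_or_odd k with he | ho
    · have h0 : k % 2 = 0 := Nat.even_iff.mp he
      have h1 : (k + 1) % 2 = 1 := by omega
      rw [h0]
      norm_num
      rw [hxR, hyR, Prod.mk.eta, pvCount_eq, hk1, ih]
      rw [h1]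
      norm_num
      rw [pvAPos, List.foldl_cons]
    · have h0 : k % 2 = 1 := Nat.odd_iff.mp ho
      have h1 : (k + 1) % 2 = 0 := by omega
      rw [h0]
      norm_num
      rw [hxS, hyS, Prod.mk.eta, pvCount_eq, hk1, ih]
      rw [h1]
      norm_num
      rw [pvAPos, List.foldl_cons]

lemma pvWalk_acc (cs : List Char) : ∀ (x y : Int) (acc : List (Int × Int)),
    (cs.foldl pvWalkStep (x, y, acc)).2.2 = acc ++ pvWRec cs (x, y) := by
  induction cs with
  | nil => intro x y acc; simp [pvWRec]
  | cons c cs ih =>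
    intro x y acc
    simp only [List.foldl_cons, pvWalkStep, pvWRec, ih, pvMove]
    simp

lemma pvWalk_eq (cs : List Char) : pvWalk cs = pvWRec cs (0, 0) := by
  simp [pvWalk, pvWalk_acc]

lemma pvIRec_nil_right (xs : List (Int × Int)) : pvIRec xs [] = xs := by
  cases xs <;> simp [pvIRec]

lemma pvFlat (l : List ((Int × Int) × (Int × Int))) (acc : List (Int × Int)) :
    l.foldl (fun out p => out ++ [p.1, p.2]) acc = acc ++ l.flatMap (fun p => [p.1, p.2]) := by
  induction l generalizing acc with
  | nil => simp
  | cons p l ih => simp [ih]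

lemma pvInterleave_eq (xs : List (Int × Int)) : ∀ ys, pvInterleave xs ys = pvIRec xs ys := by
  induction xs with
  | nil =>
    intro ys
    simp [pvInterleave, pvIRec, PySem.List.len_eq]
  | cons x xs ih =>
    intro ys
    cases ys with
    | nil =>
      simp [pvInterleave, pvIRec_nil_right, PySem.List.len_eq]
    | cons y ys =>
      rw [pvIRec, pvIRec, ← ih ys]
      simp only [pvInterleave, List.zip_cons_cons, List.foldl_cons, pvFlat, List.nil_append,
        List.length_cons, PySem.List.len_eq]
      by_cases h : ys.length < xs.length
      · rw [if_pos (by simpa using h), if_pos h]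
        have h1 : PySem.List.slice (x :: xs) (some (((ys.length + 1 : Nat)) : Int)) none
            = (x :: xs).drop (ys.length + 1) := PySem.List.slice_from_natCast _ _
        have h2 : PySem.List.slice xs (some ((ys.length : Nat) : Int)) none
            = xs.drop ys.length := PySem.List.slice_from_natCast _ _
        push_cast at h1 h2 ⊢
        rw [h1, h2]
        simp
      · rw [if_neg (by simpa using h), if_neg h]
        have h1 : PySem.List.slice (y :: ys) (some (((xs.length + 1 : Nat)) : Int)) none
            = (y :: ys).drop (xs.length + 1) := PySem.List.slice_from_natCast _ _
        have h2 : PySem.List.slice ys (some ((xs.length : Nat) : Int)) none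
            = ys.drop xs.length := PySem.List.slice_from_natCast _ _
        push_cast at h1 h2 ⊢
        rw [h1, h2]
        simp

lemma pvEvens_range (l : List Char) :
    (List.range ((l.length + 1) / 2)).filterMap (fun k => l[2 * k]?) = pvEvens l := by
  induction l using pvEvens.induct with
  | case1 => simp [pvEvens]
  | case2 x => simp [pvEvens]
  | case3 x y xs ih =>
    have hlen : ((x :: y :: xs).length + 1) / 2 = (xs.length + 1) / 2 + 1 := by
      simp; omega
    rw [hlen, List.range_succ_eq_map, List.filterMap_cons, List.filterMap_map]
    simp only [Nat.mul_zero, List.getElem?_cons_zero]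
    rw [pvEvens]
    rw [← ih]
    congr 1

lemma slice0 (l : List Char) : PySem.List.slice? l (some 0) none 2 = some (pvEvens l) := by
  simp only [PySem.List.slice?, PySem.List.sliceIndices]
  norm_num
  have hc : (if 0 < l.length then (((l.length : Int) + 2 - 1) / 2).toNat else 0)
      = (l.length + 1) / 2 := by
    rcases Nat.eq_zero_or_pos l.length with h | h
    · simp [h]
    · rw [if_pos h]; omega
  rw [hc]
  have hf : (fun x : Nat => l[(2 * (x : Int)).toNat]?) = fun k : Nat => l[2 * k]? := by
    funext k
    congr 1
  rw [hf, pvEvens_range]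

lemma slice1 (l : List Char) : PySem.List.slice? l (some 1) none 2 = some (pvEvens l.tail) := by
  cases l with
  | nil => rfl
  | cons a t =>
    simp only [PySem.List.slice?, PySem.List.sliceIndices]
    norm_num
    have hc : (if 0 < t.length then (((t.length : Int) + 2 - 1) / 2).toNat else 0)
        = (t.length + 1) / 2 := by
      rcases Nat.eq_zero_or_pos t.length with h | h
      · simp [h]
      · rw [if_pos h]; omega
    rw [hc]
    have hf : (fun x : Nat => (a :: t)[(1 + 2 * (x : Int)).toNat]?)
        = fun k : Nat => t[2 * k]? := by
      funext k
      rw [show ((1 + 2 * (k : Int)).toNat) = 2 * k + 1 by omega]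
      simp
    rw [hf, pvEvens_range]

lemma pvEvens_cons (c : Char) (cs : List Char) : pvEvens (c :: cs) = c :: pvEvens cs.tail := by
  cases cs <;> rfl

lemma pvMain (cs : List Char) : ∀ (a o : Int × Int),
    pvAPos cs a o = pvIRec (pvWRec (pvEvens cs) a) (pvWRec (pvEvens cs.tail) o) := by
  induction cs with
  | nil => intro a o; simp [pvAPos, pvEvens, pvWRec, pvIRec]
  | cons c cs ih =>
    intro a o
    rw [pvEvens_cons, List.tail_cons]
    rw [show pvWRec (c :: pvEvens cs.tail) a
        = pvMove a c :: pvWRec (pvEvens cs.tail) (pvMove a c) from rfl]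
    rw [pvIRec]
    rw [pvAPos, ih o (pvMove a c)]

lemma pvInit : List.foldl pvCount PySem.Dict.empty [((0 : Int), (0 : Int)), (0, 0)]
    = PySem.Dict.ofList [(((0 : Int), (0 : Int)), (2 : Int))] := by decide

-- ===== VERDICT (by name: the statement is the Claim_ definition above) =====
theorem get_visited_dict_with_robot_spec : Claim_equal_get_visited_dict_with_robot := by
  intro s _
  show get_visited_dict_with_robot s = get_visited_dict_with_robot_alt s
  have hA : get_visited_dict_with_robot s
      = (List.foldl pvCount (PySem.Dict.ofList [(((0 : Int), (0 : Int)), (2 : Int))])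
          (pvAPos s.toList (0, 0) (0, 0))).items.map (fun p => (p.1.1, p.1.2, p.2)) := by
    simp only [get_visited_dict_with_robot]
    rw [show (0 : Int) = ((0 : Nat) : Int) from rfl, foldA]
    norm_num
  have hB : get_visited_dict_with_robot_alt s
      = (List.foldl pvCount (PySem.Dict.ofList [(((0 : Int), (0 : Int)), (2 : Int))])
          (pvIRec (pvWRec (pvEvens s.toList) (0, 0)) (pvWRec (pvEvens s.toList.tail) (0, 0)))).items.map
          (fun p => (p.1.1, p.1.2, p.2)) := by
    simp only [get_visited_dict_with_robot_alt]
    rw [show PySem.Str.slice? s (some 0) none 2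
        = Option.map String.ofList (PySem.List.slice? s.toList (some 0) none 2) from rfl]
    rw [show PySem.Str.slice? s (some 1) none 2
        = Option.map String.ofList (PySem.List.slice? s.toList (some 1) none 2) from rfl]
    rw [slice0, slice1]
    simp only [Option.map_some, Option.getD_some, String.toList_ofList]
    rw [show (fun (d : PySem.Dict (Int × Int) Int) (p : Int × Int)
        => d.insert p (d.getD p 0 + 1)) = pvCount from rfl]
    rw [List.foldl_append, pvInit, pvInterleave_eq, pvWalk_eq, pvWalk_eq]
  rw [hA, hB, pvMain]
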